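-- pv_equiv track=rewrite | github.com/yuxinchen123/IsaacLab | upload_and_cleanup_videos.py | extract_step_from_filename
-- ===== SOURCE A (Python) =====
-- def extract_step_from_filename(filename):
--     """Extract step number from video filename."""
--     # Example: rl-video-step-1000.mp4 -> 1000
--     try:
--         parts = filename.split('-')
--         for i, part in enumerate(parts):
--             if part == 'step' and i + 1 < len(parts):
--                 return int(parts[i + 1].split('.')[0])
--     except:
--         pass
--     return 0
-- ===== SOURCE B (Python) =====
-- def extract_step_from_filename(filename):
--     """Extract step number from video filename."""
--     # Example: rl-video-step-1000.mp4 -> 1000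
--     if filename.startswith('step-'):
--         rest = filename[5:]
--     else:
--         idx = filename.find('-step-')
--         if idx == -1:
--             return 0
--         rest = filename[idx + 6:]
--     token = rest.split('-', 1)[0]
--     try:
--         return int(token.split('.', 1)[0])
--     except ValueError:
--         return 0
-- ===== Notes on version B (the rewrite author's own statement) =====
-- stated objective: alternative
-- what changed: A splits the filename on dashes into a token list and scans it with an enumerate loop for a step token with a successor; B never builds the token list: it locates the step marker at a token boundary with one substring search (startswith/find) and parses the characters that follow up to the next dash.
import Mathlib
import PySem

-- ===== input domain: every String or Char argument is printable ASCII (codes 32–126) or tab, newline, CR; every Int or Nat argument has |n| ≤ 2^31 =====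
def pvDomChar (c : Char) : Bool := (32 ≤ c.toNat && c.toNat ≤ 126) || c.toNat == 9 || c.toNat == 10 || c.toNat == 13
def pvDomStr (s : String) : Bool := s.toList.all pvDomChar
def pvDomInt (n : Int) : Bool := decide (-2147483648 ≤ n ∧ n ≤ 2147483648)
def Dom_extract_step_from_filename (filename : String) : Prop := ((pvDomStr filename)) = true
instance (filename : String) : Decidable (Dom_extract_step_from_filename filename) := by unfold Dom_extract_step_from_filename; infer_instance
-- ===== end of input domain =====

-- B replaces A's split('-') plus enumerate index-scan loop by a direct substring search
-- (startswith('step-') / find('-step-')); same return value on every input (objective: alternative).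

-- ===== PORT A =====
-- int(parts[i+1].split('.')[0]) inside A's try: a parse failure is caught by the bare
-- except and yields 0; '[0]' of a split result is its head (split never returns []).
def pvAParse (next : List Char) : Int :=
  match PySem.Int.ofChars? (PySem.Chars.splitOn next ['.']).headI with
  | some n => n
  | none => 0

-- the 'for i, part in enumerate(parts)' loop; the two-cons pattern is 'part == "step" and i + 1 < len(parts)'
def pvAScan : List (List Char) → Int
  | t :: next :: rest =>
    if t = ['s', 't', 'e', 'p'] then pvAParse next else pvAScan (next :: rest)
  | _ => 0

def extract_step_from_filename (filename : String) : Int :=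
  pvAScan (PySem.Chars.splitOn filename.toList ['-'])

-- ===== PORT B =====
-- int(token.split('.', 1)[0]) with 'except ValueError: return 0'
def pvBParse (token : List Char) : Int :=
  match PySem.Int.ofChars? (PySem.Chars.splitOnMax token ['.'] 1).headI with
  | some n => n
  | none => 0

-- body of B on the character list; filename[5:] / filename[idx+6:] are List.drop (a slice from a
-- nonnegative in-range start to the end); rest.split('-', 1)[0] is the head of splitOnMax.
def pvBCore (cs : List Char) : Int :=
  if PySem.Chars.startswith cs ['s', 't', 'e', 'p', '-'] then
    pvBParse ((PySem.Chars.splitOnMax (cs.drop 5) ['-'] 1).headI)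
  else
    let idx := PySem.Chars.find cs ['-', 's', 't', 'e', 'p', '-']
    if idx = -1 then 0
    else pvBParse ((PySem.Chars.splitOnMax (cs.drop (idx.toNat + 6)) ['-'] 1).headI)

def extract_step_from_filename_alt (filename : String) : Int :=
  pvBCore filename.toList

-- ===== PRECONDITION & SPEC =====
def Spec_extract_step_from_filename (filename : String) (out : Int) : Prop := out = extract_step_from_filename_alt filename
instance (filename : String) (out : Int) : Decidable (Spec_extract_step_from_filename filename out) := by unfold Spec_extract_step_from_filename; infer_instance

-- ===== CLAIM (what is proved, stated in full; the proofs are below) =====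
def Claim_equal_extract_step_from_filename : Prop := ∀ (filename : String), Dom_extract_step_from_filename filename → Spec_extract_step_from_filename filename (extract_step_from_filename filename)

-- ===== LEMMAS AND PROOFS =====

theorem pv_goM_zero (d : Char) (fuel : Nat) (l cur : List Char) (acc : List (List Char)) :
    PySem.Chars.splitOnMax.go [d] fuel 0 l cur acc = ((cur.reverse ++ l) :: acc).reverse := by
  cases fuel <;> cases l <;> simp [PySem.Chars.splitOnMax.go]

theorem pv_goM_one (d : Char) : ∀ (l : List Char) (fuel : Nat) (cur : List Char) (acc : List (List Char)),
    l.length ≤ fuel →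
    ∃ tl, PySem.Chars.splitOnMax.go [d] fuel 1 l cur acc
      = acc.reverse ++ (cur.reverse ++ l.takeWhile (· ≠ d)) :: tl := by
  intro l
  induction l with
  | nil => intro fuel cur acc _; cases fuel <;> exact ⟨[], by simp [PySem.Chars.splitOnMax.go]⟩
  | cons c r ih =>
    intro fuel cur acc hle
    cases fuel with
    | zero => simp at hle
    | succ f =>
      by_cases hc : c = d
      · refine ⟨[r], ?_⟩
        subst hc
        simp [PySem.Chars.splitOnMax.go, List.isPrefixOf, pv_goM_zero]
      · obtain ⟨tl, htl⟩ := ih f (c :: cur) acc (by simpa using hle)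
        refine ⟨tl, ?_⟩
        simp [PySem.Chars.splitOnMax.go, List.isPrefixOf, hc, htl, Ne.symm hc]

theorem pv_headI_splitOnMax_one (d : Char) (l : List Char) :
    (PySem.Chars.splitOnMax l [d] 1).headI = l.takeWhile (· ≠ d) := by
  obtain ⟨tl, htl⟩ := pv_goM_one d l (l.length + 1) [] [] (by omega)
  simp [PySem.Chars.splitOnMax, htl]

theorem pv_goS (d : Char) : ∀ (l : List Char) (fuel : Nat) (cur : List Char) (acc : List (List Char)),
    l.length ≤ fuel →
    PySem.Chars.splitOn.go [d] fuel l cur acc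
      = acc.reverse ++ (cur.reverse ++ (PySem.Chars.splitOn.go [d] (l.length + 1) l [] []).headI)
          :: (PySem.Chars.splitOn.go [d] (l.length + 1) l [] []).tail := by
  intro l
  induction l with
  | nil => intro fuel cur acc _; cases fuel <;> simp [PySem.Chars.splitOn.go]
  | cons c r ih =>
    intro fuel cur acc hle
    cases fuel with
    | zero => simp at hle
    | succ f =>
      by_cases hc : c = d
      · cases hc
        rw [show PySem.Chars.splitOn.go [d] (f+1) (d::r) cur acc
              = PySem.Chars.splitOn.go [d] f r [] (cur.reverse :: acc) by
            simp [PySem.Chars.splitOn.go, List.isPrefixOf]]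
        rw [show PySem.Chars.splitOn.go [d] ((d::r).length + 1) (d::r) [] []
              = PySem.Chars.splitOn.go [d] ((d::r).length) r [] [[]] by
            simp [PySem.Chars.splitOn.go, List.isPrefixOf]]
        rw [ih f [] (cur.reverse :: acc) (by simpa using hle),
            ih ((d::r).length) [] [[]] (by simp)]
        simp
      · rw [show PySem.Chars.splitOn.go [d] (f+1) (c::r) cur acc
              = PySem.Chars.splitOn.go [d] f r (c :: cur) acc by
            simp [PySem.Chars.splitOn.go, List.isPrefixOf, Ne.symm hc]]
        rw [show PySem.Chars.splitOn.go [d] ((c::r).length + 1) (c::r) [] []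
              = PySem.Chars.splitOn.go [d] ((c::r).length) r [c] [] by
            simp [PySem.Chars.splitOn.go, List.isPrefixOf, Ne.symm hc]]
        rw [ih f (c :: cur) acc (by simpa using hle),
            ih ((c::r).length) [c] [] (by simp)]
        simp

theorem pv_splitOn_nil (d : Char) : PySem.Chars.splitOn [] [d] = [[]] := rfl

theorem pv_splitOn_cons_sep (d : Char) (l : List Char) :
    PySem.Chars.splitOn (d :: l) [d] = [] :: ((PySem.Chars.splitOn l [d]).headI :: (PySem.Chars.splitOn l [d]).tail) := by
  unfold PySem.Chars.splitOn
  rw [show PySem.Chars.splitOn.go [d] ((d::l).length + 1) (d::l) [] []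
        = PySem.Chars.splitOn.go [d] ((d::l).length) l [] [[]] by
      simp [PySem.Chars.splitOn.go, List.isPrefixOf]]
  rw [pv_goS d l ((d::l).length) [] [[]] (by simp)]
  simp

theorem pv_splitOn_cons_ne (d c : Char) (l : List Char) (hc : c ≠ d) :
    PySem.Chars.splitOn (c :: l) [d]
      = (c :: (PySem.Chars.splitOn l [d]).headI) :: (PySem.Chars.splitOn l [d]).tail := by
  unfold PySem.Chars.splitOn
  rw [show PySem.Chars.splitOn.go [d] ((c::l).length + 1) (c::l) [] []
        = PySem.Chars.splitOn.go [d] ((c::l).length) l [c] [] by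
      simp [PySem.Chars.splitOn.go, List.isPrefixOf, Ne.symm hc]]
  rw [pv_goS d l ((c::l).length) [c] [] (by simp)]
  simp

theorem pv_splitOn_ne_nil (d : Char) (l : List Char) : PySem.Chars.splitOn l [d] ≠ [] := by
  unfold PySem.Chars.splitOn
  rw [pv_goS d l (l.length + 1) [] [] (by omega)]
  simp

theorem pv_headI_splitOn (d : Char) (l : List Char) :
    (PySem.Chars.splitOn l [d]).headI = l.takeWhile (· ≠ d) := by
  induction l with
  | nil => simp [pv_splitOn_nil]
  | cons c r ih =>
    by_cases hc : c = d
    · cases hc; simp [pv_splitOn_cons_sep]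
    · simp [pv_splitOn_cons_ne d c r hc, ih, hc]

theorem pv_splitOn_no_sep (d : Char) (l : List Char) (h : d ∉ l) : PySem.Chars.splitOn l [d] = [l] := by
  induction l with
  | nil => exact pv_splitOn_nil d
  | cons c r ih =>
    have hc : c ≠ d := fun he => h (he ▸ List.mem_cons_self)
    have hr := ih (fun hm => h (List.mem_cons_of_mem _ hm))
    simp [pv_splitOn_cons_ne d c r hc, hr]

theorem pv_splitOn_append (d : Char) (t r : List Char) (h : d ∉ t) :
    PySem.Chars.splitOn (t ++ d :: r) [d]
      = t :: ((PySem.Chars.splitOn r [d]).headI :: (PySem.Chars.splitOn r [d]).tail) := by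
  induction t with
  | nil => simpa using pv_splitOn_cons_sep d r
  | cons c t' ih =>
    have hc : c ≠ d := fun he => h (he ▸ List.mem_cons_self)
    have ht' := ih (fun hm => h (List.mem_cons_of_mem _ hm))
    simp [pv_splitOn_cons_ne d c (t' ++ d :: r) hc, ht']

theorem pv_find_eq_of (l sub : List Char) (p : Nat) (hp : sub <+: l.drop p)
    (hmin : ∀ q, q < p → ¬ sub <+: l.drop q) :
    PySem.Chars.find l sub = (p : Int) := by
  have hinf : sub <:+: l := by
    obtain ⟨u, hu⟩ := hp
    exact ⟨l.take p, u, by rw [List.append_assoc, hu]; exact List.take_append_drop p l⟩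
  have hne1 : PySem.Chars.find l sub ≠ -1 := (PySem.Chars.find_ne_neg_one_iff l sub).mpr hinf
  have hge : 0 ≤ PySem.Chars.find l sub := by
    have := PySem.Chars.neg_one_le_find l sub
    omega
  obtain ⟨hpre, hm⟩ := PySem.Chars.find_spec (s := l) (sub := sub) hge
  have : (PySem.Chars.find l sub).toNat = p := by
    rcases Nat.lt_trichotomy (PySem.Chars.find l sub).toNat p with h | h | h
    · exact absurd hpre (hmin _ h)
    · exact h
    · exact absurd hp (hm _ h)
  omega

theorem pv_find_eq_neg_one (l sub : List Char) (h : ∀ q, ¬ sub <+: l.drop q) :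
    PySem.Chars.find l sub = -1 := by
  rw [PySem.Chars.find_eq_neg_one_iff]
  intro hinf
  obtain ⟨u, v, huv⟩ := hinf
  exact h u.length ⟨v, by rw [← huv]; simp⟩

-- a '-'-free token followed by '-' is determined by any equal decomposition
theorem pv_token_unique (d : Char) : ∀ (t sub r r' : List Char), d ∉ t → d ∉ sub →
    t ++ d :: r = sub ++ d :: r' → t = sub ∧ r = r' := by
  intro t
  induction t with
  | nil =>
    intro sub r r' _ hsub he
    cases sub with
    | nil => simpa using he
    | cons x s' =>
      simp only [List.nil_append, List.cons_append, List.cons.injEq] at he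
      exact absurd (he.1 ▸ List.mem_cons_self) hsub
  | cons c t' ih =>
    intro sub r r' ht hsub he
    cases sub with
    | nil =>
      simp only [List.cons_append, List.nil_append, List.cons.injEq] at he
      exact absurd (he.1 ▸ List.mem_cons_self) ht
    | cons x s' =>
      simp only [List.cons_append, List.cons.injEq] at he
      obtain ⟨h1, h2⟩ := ih s' r r' (fun hm => ht (List.mem_cons_of_mem _ hm))
        (fun hm => hsub (List.mem_cons_of_mem _ hm)) he.2
      exact ⟨by rw [he.1, h1], h2⟩

-- no occurrence of a '-'-initial pattern starts inside the '-'-free token t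
theorem pv_no_occ_in_token (d : Char) (t r w : List Char) (ht : d ∉ t) (p : Nat) (hp : p < t.length) :
    ¬ (d :: w) <+: (t ++ d :: r).drop p := by
  intro hpre
  have hdrop : (t ++ d :: r).drop p = t.drop p ++ d :: r := by
    rw [List.drop_append_of_le_length (by omega)]
  rw [hdrop] at hpre
  obtain ⟨c, t2, ht2⟩ : ∃ c t2, t.drop p = c :: t2 := by
    cases h : t.drop p with
    | nil => exact absurd (List.drop_eq_nil_iff.mp h) (by omega)
    | cons a b => exact ⟨a, b, rfl⟩
  rw [ht2] at hpre
  obtain ⟨u, hu⟩ := hpre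
  simp only [List.cons_append, List.cons.injEq] at hu
  have : c ∈ t := by
    have : c ∈ t.drop p := ht2 ▸ List.mem_cons_self
    exact List.mem_of_mem_drop this
  exact ht (hu.1 ▸ this)

theorem pv_parse_eq (tok : List Char) : pvAParse tok = pvBParse tok := by
  unfold pvAParse pvBParse
  rw [pv_headI_splitOn, pv_headI_splitOnMax_one]

theorem pv_drop_shift (t r : List Char) (m : Nat) :
    (t ++ '-' :: r).drop (t.length + 1 + m) = r.drop m := by
  induction t with
  | nil => simp [Nat.add_comm]
  | cons c t' ih =>
    rw [List.cons_append, List.length_cons,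
      show t'.length + 1 + 1 + m = (t'.length + 1 + m) + 1 by omega,
      List.drop_succ_cons]
    exact ih

theorem pv_main : ∀ (n : Nat) (cs : List Char), cs.length ≤ n →
    pvAScan (PySem.Chars.splitOn cs ['-']) = pvBCore cs := by
  intro n
  induction n with
  | zero =>
    intro cs h
    have : cs = [] := List.eq_nil_of_length_eq_zero (by omega)
    subst this; rfl
  | succ n ih =>
    intro cs hlen
    by_cases hd : '-' ∈ cs
    · -- cs = t ++ '-' :: r with '-' ∉ t
      obtain ⟨a, r, hdw⟩ : ∃ a r, cs.dropWhile (· ≠ '-') = a :: r := by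
        cases h : cs.dropWhile (· ≠ '-') with
        | nil =>
          rw [List.dropWhile_eq_nil_iff] at h
          have := h '-' hd
          simp at this
        | cons a b => exact ⟨a, b, rfl⟩
      have ha : a = '-' := by
        have hne : cs.dropWhile (fun x => decide (x ≠ '-')) ≠ [] := by rw [hdw]; simp
        have := List.head_dropWhile_not (p := fun x => decide (x ≠ '-')) (l := cs) hne
        simp only [hdw, List.head_cons] at this
        simpa using this
      subst ha
      obtain ⟨t, htdef⟩ : ∃ t, cs.takeWhile (· ≠ '-') = t := ⟨_, rfl⟩
      have hcs : cs = t ++ '-' :: r := by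
        rw [← htdef, ← hdw, List.takeWhile_append_dropWhile]
      have ht : '-' ∉ t := by
        intro hm
        rw [← htdef] at hm
        have := List.mem_takeWhile_imp hm
        simp at this
      have hrlen : r.length ≤ n := by
        have := congrArg List.length hcs
        simp at this; omega
      have hIH := ih r hrlen
      rw [hcs, pv_splitOn_append '-' t r ht]
      by_cases hts : t = ['s','t','e','p']
      · -- first token is 'step'
        subst hts
        have hstart : PySem.Chars.startswith (['s','t','e','p'] ++ '-' :: r) ['s','t','e','p','-'] = true := by
          rw [PySem.Chars.startswith_iff]
          exact ⟨r, by simp⟩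
        have hdrop : ((['s','t','e','p'] : List Char) ++ '-' :: r).drop 5 = r := rfl
        simp only [pvAScan, pvBCore, hstart, if_true, hdrop]
        rw [pv_headI_splitOn, pv_headI_splitOnMax_one, pv_parse_eq]
      · -- first token is not 'step': A recurses; B's search starts after t
        obtain ⟨s0, S', hS⟩ : ∃ s0 S', PySem.Chars.splitOn r ['-'] = s0 :: S' := by
          cases h : PySem.Chars.splitOn r ['-'] with
          | nil => exact absurd h (pv_splitOn_ne_nil '-' r)
          | cons a b => exact ⟨a, b, rfl⟩
        have hAside : pvAScan (t :: (PySem.Chars.splitOn r ['-']).headI :: (PySem.Chars.splitOn r ['-']).tail)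
            = pvAScan (PySem.Chars.splitOn r ['-']) := by
          rw [hS]
          simp [pvAScan, hts]
        rw [hAside, hIH]
        -- now: pvBCore (t ++ '-'::r) = pvBCore r
        have hstartF : PySem.Chars.startswith (t ++ '-' :: r) ['s','t','e','p','-'] = false := by
          rw [Bool.eq_false_iff]
          intro hT
          obtain ⟨u, hu⟩ := (PySem.Chars.startswith_iff _ _).mp hT
          have : (['s','t','e','p'] : List Char) ++ '-' :: u = t ++ '-' :: r := by
            rw [← hu]; rfl
          exact hts (pv_token_unique '-' t _ r u ht (by decide) this.symm).1
        by_cases hrs : (['s','t','e','p','-'] : List Char) <+: r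
        · -- B on r takes the startswith branch; in cs the first '-step-' is at t.length
          have hstartR : PySem.Chars.startswith r ['s','t','e','p','-'] = true :=
            (PySem.Chars.startswith_iff _ _).mpr hrs
          have hfind : PySem.Chars.find (t ++ '-' :: r) ['-','s','t','e','p','-'] = (t.length : Int) := by
            apply pv_find_eq_of
            · rw [List.drop_left]
              exact (List.cons_prefix_cons).mpr ⟨rfl, hrs⟩
            · intro q hq; exact pv_no_occ_in_token '-' t r _ ht q hq
          have hdropc : (t ++ '-' :: r).drop (t.length + 6) = r.drop 5 := by
            rw [show t.length + 6 = t.length + 1 + 5 by omega]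
            exact pv_drop_shift t r 5
          simp only [pvBCore, hstartF, Bool.false_eq_true, if_false, hfind, hstartR, if_true]
          rw [if_neg (by omega)]
          rw [show ((t.length : Int).toNat + 6) = t.length + 6 by simp, hdropc]
        · have hstartRF : PySem.Chars.startswith r ['s','t','e','p','-'] = false := by
            rw [Bool.eq_false_iff]; intro hT; exact hrs ((PySem.Chars.startswith_iff _ _).mp hT)
          by_cases hk : PySem.Chars.find r ['-','s','t','e','p','-'] = -1
          · -- no occurrence anywhere
            have hnor : ∀ j, ¬ (['-','s','t','e','p','-'] : List Char) <+: r.drop j := by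
              intro j hpre
              have hinf : (['-','s','t','e','p','-'] : List Char) <:+: r := by
                obtain ⟨u, hu⟩ := hpre
                exact ⟨r.take j, u, by rw [List.append_assoc, hu]; exact List.take_append_drop j r⟩
              exact (PySem.Chars.find_eq_neg_one_iff r _).mp hk hinf
            have hfind : PySem.Chars.find (t ++ '-' :: r) ['-','s','t','e','p','-'] = -1 := by
              apply pv_find_eq_neg_one
              intro q hpre
              rcases Nat.lt_trichotomy q t.length with h | h | h
              · exact pv_no_occ_in_token '-' t r _ ht q h hpre
              · subst h
                rw [List.drop_left] at hpre
                exact hrs ((List.cons_prefix_cons).mp hpre).2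
              · obtain ⟨j, hj⟩ : ∃ j, q = t.length + 1 + j := ⟨q - t.length - 1, by omega⟩
                rw [hj, pv_drop_shift] at hpre
                exact hnor j hpre
            simp [pvBCore, hstartF, hstartRF, hfind, hk]
          · -- first occurrence in r at k; in cs it is at t.length + 1 + k
            have hge : 0 ≤ PySem.Chars.find r ['-','s','t','e','p','-'] := by
              have := PySem.Chars.neg_one_le_find r ['-','s','t','e','p','-']
              omega
            obtain ⟨hpre, hmin⟩ := PySem.Chars.find_spec (s := r) (sub := ['-','s','t','e','p','-']) hge
            set k := (PySem.Chars.find r ['-','s','t','e','p','-']).toNat with hkdef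
            have hfind : PySem.Chars.find (t ++ '-' :: r) ['-','s','t','e','p','-'] = ((t.length + 1 + k : Nat) : Int) := by
              apply pv_find_eq_of
              · rw [pv_drop_shift]; exact hpre
              · intro q hq
                rcases Nat.lt_trichotomy q t.length with h | h | h
                · exact pv_no_occ_in_token '-' t r _ ht q h
                · subst h
                  rw [List.drop_left]
                  intro hpre'
                  exact hrs ((List.cons_prefix_cons).mp hpre').2
                · obtain ⟨j, hj⟩ : ∃ j, q = t.length + 1 + j ∧ j < k := ⟨q - t.length - 1, by omega, by omega⟩
                  rw [hj.1, pv_drop_shift]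
                  exact hmin j hj.2
            have hdropc : (t ++ '-' :: r).drop (t.length + 1 + k + 6) = r.drop (k + 6) := by
              have := pv_drop_shift t r (k + 6)
              simpa [Nat.add_assoc] using this
            simp only [pvBCore, hstartF, Bool.false_eq_true, if_false, hstartRF, hfind]
            rw [if_neg hk, if_neg (show ¬((t.length + 1 + k : Nat) : Int) = -1 by omega)]
            rw [show (((t.length + 1 + k : Nat) : Int).toNat + 6) = t.length + 1 + k + 6 by omega, hdropc, hkdef]
    · -- no '-' at all: both return 0
      rw [pv_splitOn_no_sep '-' cs hd]
      have h1 : PySem.Chars.startswith cs ['s','t','e','p','-'] = false := by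
        rw [Bool.eq_false_iff]
        intro hT
        obtain ⟨u, hu⟩ := (PySem.Chars.startswith_iff _ _).mp hT
        exact hd (by rw [← hu]; simp)
      have h2 : PySem.Chars.find cs ['-','s','t','e','p','-'] = -1 := by
        apply pv_find_eq_neg_one
        intro q hpre
        obtain ⟨u, hu⟩ := hpre
        have : '-' ∈ cs.drop q := by rw [← hu]; simp
        exact hd (List.mem_of_mem_drop this)
      simp [pvAScan, pvBCore, h1, h2]

-- ===== VERDICT (by name: the statement is the Claim_ definition above) =====
theorem extract_step_from_filename_spec : Claim_equal_extract_step_from_filename := by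
  intro filename _
  unfold Spec_extract_step_from_filename extract_step_from_filename extract_step_from_filename_alt
  exact pv_main filename.toList.length filename.toList le_rfl
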